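-- pv_equiv track=rewrite | github.com/kacpwoja/ECRYP | kolos1.py | find_generators
-- ===== SOURCE A (Python) =====
-- from math import gcd
--
-- def list_elements(modulus: int) -> []:
-- 	""" Task example:
-- 		List all elements in the mult. group Z*15(modulus)
-- 	"""
-- 	result = []
-- 	for i in range(modulus):
-- 		if gcd(i, modulus) == 1:
-- 			result.append(i)
-- 	return result
--
-- def find_generators(modulus: int) -> []:
-- 	""" Task example:
-- 		Find all generators of mult. group Z*17(modulus)
-- 	"""
-- 	group = list_elements(modulus)
-- 	generators = []
-- 	for g in group:
-- 		g_group = []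
-- 		for k in range(1,len(group)+1):
-- 			g_group.append((g**k)%modulus)
-- 		g_group.sort()
-- 		if g_group == group:
-- 			generators.append(g)
-- 	return generators
-- ===== SOURCE B (Python) =====
-- from math import gcd
--
-- def find_generators(modulus: int) -> []:
--     """Find all generators of the multiplicative group mod `modulus`,
--     using incremental modular exponentiation instead of bignum powers."""
--     group = [i for i in range(modulus) if gcd(i, modulus) == 1]
--     m = len(group)
--     generators = []
--     for g in group:
--         seen = set()
--         p = 1
--         for _ in range(m):
--             p = p * g % modulus
--             seen.add(p)
--         if len(seen) == m:
--             generators.append(g)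
--     return generators
-- ===== Notes on version B (the rewrite author's own statement) =====
-- stated objective: faster
-- what changed: Instead of recomputing the bignum power g**k and sorting the list of residues for every candidate, B maintains a running product mod n and counts distinct residues with a set; g is a generator iff its m successive powers are all distinct.
import Mathlib
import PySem

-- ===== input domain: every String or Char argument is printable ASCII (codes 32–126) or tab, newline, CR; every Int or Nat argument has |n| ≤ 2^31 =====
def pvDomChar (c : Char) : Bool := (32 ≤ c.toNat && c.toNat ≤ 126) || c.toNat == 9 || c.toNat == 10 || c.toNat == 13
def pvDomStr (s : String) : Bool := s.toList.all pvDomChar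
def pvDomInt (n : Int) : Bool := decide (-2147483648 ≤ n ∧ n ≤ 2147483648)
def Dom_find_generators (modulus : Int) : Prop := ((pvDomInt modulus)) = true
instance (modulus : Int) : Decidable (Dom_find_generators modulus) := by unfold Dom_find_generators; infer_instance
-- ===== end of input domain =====

-- B replaces A's per-candidate bignum powers g**k and per-candidate sort by a running
-- product mod n and a count of distinct residues (objective: faster).

-- ===== PORT A =====
def list_elements (modulus : Int) : List Int :=
  (PySem.List.pyRange 0 modulus 1).foldl
    (fun result i => if Int.gcd i modulus = 1 then result ++ [i] else result) []

def find_generators (modulus : Int) : List Int :=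
  let group := list_elements modulus
  group.foldl (fun generators g =>
    let g_group := (PySem.List.pyRange 1 ((group.length : Int) + 1) 1).foldl
      (fun acc k => acc ++ [PySem.Int.mod (g ^ k.toNat) modulus]) []
    let g_group' := PySem.List.sorted g_group (fun x => x) false
    if g_group' = group then generators ++ [g] else generators) []

-- ===== PORT B =====
def find_generators_alt (modulus : Int) : List Int :=
  let group := (PySem.List.pyRange 0 modulus 1).filter (fun i => Int.gcd i modulus == 1)
  let m := group.length
  group.foldl (fun generators g =>
    let st := (List.range m).foldl
      (fun (st : Int × PySem.Set Int) _ =>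
        let p := PySem.Int.mod (st.1 * g) modulus
        (p, PySem.Set.add st.2 p)) (1, PySem.Set.empty)
    if PySem.Set.len st.2 = m then generators ++ [g] else generators) []

-- ===== PRECONDITION & SPEC =====
def Spec_find_generators (modulus : Int) (out : List Int) : Prop := out = find_generators_alt modulus
instance (modulus : Int) (out : List Int) : Decidable (Spec_find_generators modulus out) := by unfold Spec_find_generators; infer_instance

-- ===== CLAIM (what is proved, stated in full; the proofs are below) =====
def Claim_equal_find_generators : Prop := ∀ (modulus : Int), Dom_find_generators modulus → Spec_find_generators modulus (find_generators modulus)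

-- ===== LEMMAS AND PROOFS =====

-- the multiplicative group mod n, as both ports compute it
def pvGroup (n : Int) : List Int :=
  (PySem.List.pyRange 0 n 1).filter (fun i => Int.gcd i n == 1)

lemma list_elements_eq_pvGroup (n : Int) : list_elements n = pvGroup n := by
  unfold list_elements pvGroup
  rw [PySem.List.foldl_append_ite_eq_filter]
  simp only [List.nil_append]
  apply List.filter_congr
  intro x _
  rw [Bool.eq_iff_iff]; simp

lemma mem_pvGroup (n x : Int) : x ∈ pvGroup n ↔ (0 ≤ x ∧ x < n) ∧ Int.gcd x n = 1 := by
  simp [pvGroup, List.mem_filter, PySem.List.mem_pyRange_one]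

lemma pvGroup_pairwise (n : Int) : (pvGroup n).Pairwise (· < ·) :=
  (PySem.List.pairwise_lt_pyRange_one 0 n).filter _

lemma pvGroup_nodup (n : Int) : (pvGroup n).Nodup :=
  (pvGroup_pairwise n).imp (fun h => ne_of_lt h)

-- the common list of the m successive powers of g, reduced mod n
def pvPows (n g : Int) (m : Nat) : List Int :=
  (List.range m).map (fun k => PySem.Int.mod (g ^ (k + 1)) n)

lemma length_pvPows (n g : Int) (m : Nat) : (pvPows n g m).length = m := by
  simp [pvPows]

-- A's inner loop builds pvPows
lemma a_inner_eq_pvPows (n g : Int) (m : Nat) :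
    (PySem.List.pyRange 1 ((m : Int) + 1) 1).foldl
      (fun acc k => acc ++ [PySem.Int.mod (g ^ k.toNat) n]) [] = pvPows n g m := by
  rw [PySem.List.foldl_append_singleton_eq_map, List.nil_append, PySem.List.pyRange_one,
    List.map_map]
  have h : ((m : Int) + 1 - 1).toNat = m := by omega
  rw [h]
  unfold pvPows
  apply List.map_congr_left
  intro k _
  simp only [Function.comp]
  have hk : (1 + (k : Int)).toNat = k + 1 := by omega
  rw [hk]

-- B's inner loop: running product, and the set of residues seen so far
lemma b_inner_eq (n g : Int) (hn : 0 < n) (m : Nat) :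
    (List.range m).foldl
      (fun (st : Int × PySem.Set Int) _ =>
        let p := PySem.Int.mod (st.1 * g) n
        (p, PySem.Set.add st.2 p)) (1, PySem.Set.empty) =
    ((if m = 0 then 1 else PySem.Int.mod (g ^ m) n), PySem.Set.ofList (pvPows n g m)) := by
  induction m with
  | zero => simp [pvPows, PySem.Set.ofList, PySem.Set.empty]
  | succ j ih =>
    rw [List.range_succ, List.foldl_append, ih]
    have hpows : pvPows n g (j + 1) = pvPows n g j ++ [PySem.Int.mod (g ^ (j + 1)) n] := by
      unfold pvPows; rw [List.range_succ, List.map_append]; rfl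
    rw [hpows, PySem.Set.ofList_append_singleton]
    simp only [List.foldl_cons, List.foldl_nil]
    rcases Nat.eq_zero_or_pos j with h | h
    · subst h
      simp [PySem.Int.mod_eq_emod_of_pos hn]
    · rw [if_neg (by omega), if_neg (by omega)]
      simp only [PySem.Int.mod_eq_emod_of_pos hn]
      have key : g ^ j % n * g % n = g ^ (j + 1) % n := by
        rw [Int.mul_emod, Int.emod_emod_of_dvd _ dvd_rfl, ← Int.mul_emod, ← pow_succ]
      rw [key]

-- the residues lie in the group
lemma pvPows_subset (n g : Int) (hn : 0 < n) (hg : Int.gcd g n = 1) (m : Nat) :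
    ∀ x ∈ pvPows n g m, x ∈ pvGroup n := by
  intro x hx
  simp only [pvPows, List.mem_map, List.mem_range] at hx
  obtain ⟨k, -, rfl⟩ := hx
  rw [PySem.Int.mod_eq_emod_of_pos hn, mem_pvGroup]
  refine ⟨⟨Int.emod_nonneg _ (by omega), Int.emod_lt_of_pos _ hn⟩, ?_⟩
  rw [Int.gcd_emod]
  exact Int.isCoprime_iff_gcd_eq_one.mp ((Int.isCoprime_iff_gcd_eq_one.mpr hg).pow_left)

-- core: the sorted powers equal the group iff the powers are pairwise distinct
lemma sorted_iff_card (n g : Int) (hn : 0 < n) (hg : g ∈ pvGroup n) :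
    (PySem.List.sorted (pvPows n g (pvGroup n).length) (fun x => x) false = pvGroup n) ↔
    (PySem.Set.ofList (pvPows n g (pvGroup n).length)).length = (pvGroup n).length := by
  set G := pvGroup n with hG
  set L := pvPows n g G.length with hL
  have hlen : L.length = G.length := length_pvPows n g G.length
  constructor
  · intro h
    have hperm : G.Perm L := h ▸ PySem.List.sorted_perm L (fun x => x) false
    have hnod : L.Nodup := hperm.nodup_iff.mp (pvGroup_nodup n)
    rw [PySem.Set.ofList_eq_self_of_nodup _ hnod, hlen]
  · intro h
    have hfin : (PySem.Set.ofList L).toFinset = L.toFinset := by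
      ext x; simp [List.mem_toFinset, PySem.Set.mem_ofList]
    have hnod : L.Nodup := by
      have hc : L.toFinset.card = L.length := by
        rw [← hfin, List.toFinset_card_of_nodup (PySem.Set.nodup_ofList L), h, hlen]
      rw [List.card_toFinset] at hc
      have hd := List.Sublist.eq_of_length (List.dedup_sublist L) hc
      rw [← hd]; exact List.nodup_dedup L
    have hsub : L ⊆ G := pvPows_subset n g hn ((mem_pvGroup n g).mp hg).2 G.length
    have hperm : L.Perm G :=
      (List.subperm_of_subset hnod hsub).perm_of_length_le (by omega)
    exact PySem.List.sorted_eq_of_perm_of_pairwise_lt L G (fun x => x) hperm.symm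
      (pvGroup_pairwise n)

-- ===== VERDICT (by name: the statement is the Claim_ definition above) =====
theorem find_generators_spec : Claim_equal_find_generators := by
  intro n _
  unfold Spec_find_generators find_generators find_generators_alt
  simp only [list_elements_eq_pvGroup]
  apply PySem.List.foldl_congr_mem'
  intro g hg acc
  have hmem := (mem_pvGroup n g).mp hg
  have hn : 0 < n := by omega
  have hGdef : (PySem.List.pyRange 0 n 1).filter (fun i => Int.gcd i n == 1) = pvGroup n := rfl
  rw [hGdef, a_inner_eq_pvPows n g (pvGroup n).length, b_inner_eq n g hn]
  simp only [PySem.Set.len, Nat.cast_inj]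
  by_cases h : PySem.List.sorted (pvPows n g (pvGroup n).length) (fun x => x) false = pvGroup n
  · rw [if_pos h, if_pos ((sorted_iff_card n g hn hg).mp h)]
  · rw [if_neg h, if_neg (fun hc => h ((sorted_iff_card n g hn hg).mpr hc))]
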